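-- pv_equiv track=rewrite | github.com/KevinTudor/Python | SimpleMath/SubstringDuplicationParser.py | find_dup_str
-- ===== SOURCE A (Python) =====
-- def find_dup_str(s, n):
--
--     dub_str = []
--     dub_count = 0
--
--     for x in range (0, len(s)-1):
--         dub_str.append(s[x:x + n])
--
--     #print ("\nList:", dub_str)
--
--     for y in range (0, len(dub_str)-1):
--         if (dub_count == 1):
--             break
--         for z in range (y + 1, len(dub_str)):
--             if (dub_str[y] == dub_str[z]):
--                 dub_count += 1
--                 return (dub_str[y])
--
--     if (dub_count == 0):
--        return ""
-- ===== SOURCE B (Python) =====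
-- def find_dup_str(s, n):
--     subs = [s[x:x + n] for x in range(len(s) - 1)]
--     counts = {}
--     for sub in subs:
--         counts[sub] = counts.get(sub, 0) + 1
--     for sub in subs:
--         if counts[sub] > 1:
--             return sub
--     return ""
-- ===== Notes on version B (the rewrite author's own statement) =====
-- stated objective: faster
-- what changed: replaces the quadratic nested scan over all later indices with a hash-count dictionary built in one pass, then a single scan for the first substring whose count exceeds 1
import Mathlib
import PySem

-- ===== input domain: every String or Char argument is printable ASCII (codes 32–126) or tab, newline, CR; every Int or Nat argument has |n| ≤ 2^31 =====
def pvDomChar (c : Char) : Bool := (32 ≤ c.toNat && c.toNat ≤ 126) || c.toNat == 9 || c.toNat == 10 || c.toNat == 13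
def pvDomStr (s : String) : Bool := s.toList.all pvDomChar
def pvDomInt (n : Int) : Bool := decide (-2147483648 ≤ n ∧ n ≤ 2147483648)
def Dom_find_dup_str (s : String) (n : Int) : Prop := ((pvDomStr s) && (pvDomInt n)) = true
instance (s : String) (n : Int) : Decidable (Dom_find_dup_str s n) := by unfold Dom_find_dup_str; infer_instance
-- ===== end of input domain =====

-- B replaces A's quadratic nested later-index scan with a one-pass count dictionary
-- followed by a single scan for the first substring counted more than once (faster).

set_option maxRecDepth 4096

-- ===== PORT A =====
-- inner loop: 'for z in range(y+1, len(dub_str)): if dub_str[y] == dub_str[z]: … return dub_str[y]'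
def pvInnerA (L : List String) (sy : String) : List Int → Bool
  | [] => false
  | z :: zs =>
    match PySem.List.pyGet? L z with
    | none => false   -- unreachable: z is an in-range index
    | some sz => if sy == sz then true else pvInnerA L sy zs

-- outer loop over y; dub_count stays 0 on every path that continues (the increment
-- is immediately followed by 'return'), so the 'break' test compares against 0.
def pvOuterA (L : List String) (dubCount : Int) : List Int → Option String
  | [] => none
  | y :: ys =>
    if dubCount == 1 then none
    else
      match PySem.List.pyGet? L y with
      | none => none   -- unreachable: y is an in-range index
      | some sy =>
        if pvInnerA L sy (PySem.List.pyRange (y + 1) (L.length : Int) 1) then some sy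
        else pvOuterA L dubCount ys

def find_dup_str (s : String) (n : Int) : String :=
  -- dub_str built by appending s[x:x+n] for x in range(0, len(s)-1)
  let dubStr : List String :=
    (PySem.List.pyRange 0 (PySem.Str.len s - 1) 1).foldl
      (fun acc x => acc ++ [PySem.Str.slice s (some x) (some (x + n))]) []
  match pvOuterA dubStr 0 (PySem.List.pyRange 0 ((dubStr.length : Int) - 1) 1) with
  | some r => r
  | none => ""   -- dub_count == 0 here, so the Python returns ""

-- ===== PORT B =====
-- 'counts[sub] = counts.get(sub, 0) + 1'
def pvCountsB (subs : List String) : PySem.Dict String Int :=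
  subs.foldl (fun d x => d.insert x (d.getD x 0 + 1)) PySem.Dict.empty

-- 'for sub in subs: if counts[sub] > 1: return sub'; every scanned sub is a key of counts
def pvScanB (d : PySem.Dict String Int) : List String → String
  | [] => ""
  | x :: xs => if d.getD x 0 > 1 then x else pvScanB d xs

def find_dup_str_alt (s : String) (n : Int) : String :=
  let subs : List String :=
    (PySem.List.pyRange 0 (PySem.Str.len s - 1) 1).map
      (fun x => PySem.Str.slice s (some x) (some (x + n)))
  pvScanB (pvCountsB subs) subs

-- ===== PRECONDITION & SPEC =====
def Spec_find_dup_str (s : String) (n : Int) (out : String) : Prop := out = find_dup_str_alt s n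
instance (s : String) (n : Int) (out : String) : Decidable (Spec_find_dup_str s n out) := by unfold Spec_find_dup_str; infer_instance

-- ===== CLAIM (what is proved, stated in full; the proofs are below) =====
def Claim_equal_find_dup_str : Prop := ∀ (s : String) (n : Int), Dom_find_dup_str s n → Spec_find_dup_str s n (find_dup_str s n)

-- ===== LEMMAS AND PROOFS =====

-- common reference form: first element having a later equal element
def pvFirstDup : List String → Option String
  | [] => none
  | a :: t => if a ∈ t then some a else pvFirstDup t

lemma pvFirstDup_short (L : List String) (h : L.length ≤ 1) : pvFirstDup L = none := by
  match L, h with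
  | [], _ => rfl
  | [a], _ => simp [pvFirstDup]

lemma pvInnerA_eq (L : List String) (sy : String) :
    ∀ (m k : Nat), L.length - k = m →
      pvInnerA L sy (PySem.List.pyRange (k : Int) (L.length : Int) 1) = decide (sy ∈ L.drop k) := by
  intro m
  induction m with
  | zero =>
    intro k hm
    have hk : L.length ≤ k := by omega
    rw [PySem.List.pyRange_one_eq_nil (by exact_mod_cast hk), List.drop_eq_nil_of_le hk]
    simp [pvInnerA]
  | succ m ih =>
    intro k hm
    have hk : k < L.length := by omega
    rw [PySem.List.pyRange_one_cons (by exact_mod_cast hk)]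
    have hget : PySem.List.pyGet? L (k : Int) = some L[k] := by
      rw [PySem.List.pyGet?_natCast]; exact List.getElem?_eq_getElem hk
    have hstep : ((k : Int) + 1) = ((k + 1 : Nat) : Int) := by push_cast; ring
    simp only [pvInnerA, hget, hstep, ih (k + 1) (by omega)]
    have hmem : (sy ∈ L.drop k) ↔ (sy = L[k] ∨ sy ∈ L.drop (k + 1)) := by
      rw [List.drop_eq_getElem_cons hk]; exact List.mem_cons
    by_cases hsy : sy = L[k]
    · rw [if_pos (beq_iff_eq.mpr hsy)]
      exact (decide_eq_true (hmem.mpr (Or.inl hsy))).symm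
    · rw [if_neg (by simp [hsy])]
      simp [hmem, hsy]

lemma pvOuterA_eq (L : List String) :
    ∀ (m k : Nat), L.length - k = m →
      pvOuterA L 0 (PySem.List.pyRange (k : Int) ((L.length : Int) - 1) 1) = pvFirstDup (L.drop k) := by
  intro m
  induction m with
  | zero =>
    intro k hm
    have hk : L.length ≤ k := by omega
    have hk' : (L.length : Int) ≤ (k : Int) := by exact_mod_cast hk
    rw [PySem.List.pyRange_one_eq_nil (by omega), List.drop_eq_nil_of_le hk]
    rfl
  | succ m ih =>
    intro k hm
    have hk : k < L.length := by omega
    by_cases hk1 : k + 1 < L.length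
    · have hk1' : ((k : Int) + 1) < (L.length : Int) := by exact_mod_cast hk1
      rw [PySem.List.pyRange_one_cons (by omega)]
      have hget : PySem.List.pyGet? L (k : Int) = some L[k] := by
        rw [PySem.List.pyGet?_natCast]; exact List.getElem?_eq_getElem hk
      have hstep : ((k : Int) + 1) = ((k + 1 : Nat) : Int) := by push_cast; ring
      simp only [pvOuterA, hget, hstep, show ((0 : Int) == 1) = false from rfl,
        Bool.false_eq_true, if_false]
      rw [pvInnerA_eq L L[k] (L.length - (k + 1)) (k + 1) rfl, ih (k + 1) (by omega)]
      conv_rhs => rw [List.drop_eq_getElem_cons hk]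
      simp only [pvFirstDup]
      by_cases hmem : L[k] ∈ L.drop (k + 1) <;> simp [hmem]
    · -- the range is empty here: len ≤ k+1, and drop k has at most one element
      have hlen : L.length = k + 1 := by omega
      have hlen' : (L.length : Int) = (k : Int) + 1 := by exact_mod_cast hlen
      rw [PySem.List.pyRange_one_eq_nil (by omega)]
      rw [pvFirstDup_short _ (by simp [List.length_drop]; omega)]
      rfl

lemma pvScanB_congr (d d' : PySem.Dict String Int) (M : List String)
    (h : ∀ x ∈ M, (d.getD x 0 > 1) ↔ (d'.getD x 0 > 1)) : pvScanB d M = pvScanB d' M := by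
  induction M with
  | nil => rfl
  | cons a t ih =>
    simp only [pvScanB]
    by_cases ha : d.getD a 0 > 1
    · rw [if_pos ha, if_pos ((h a (by simp)).mp ha)]
    · rw [if_neg ha, if_neg (fun hc => ha ((h a (by simp)).mpr hc)),
        ih (fun x hx => h x (by simp [hx]))]

lemma pvCountsB_getD (L : List String) (x : String) :
    (pvCountsB L).getD x 0 = (L.count x : Int) := by
  unfold pvCountsB
  rw [PySem.Dict.foldl_insert_getD_add_one_eq_counter, PySem.Dict.getD_counter]

lemma pvScanB_counts (L : List String) :
    pvScanB (pvCountsB L) L = (pvFirstDup L).getD "" := by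
  induction L with
  | nil => rfl
  | cons a t ih =>
    simp only [pvScanB, pvCountsB_getD]
    by_cases hm : a ∈ t
    · have h1 : 0 < t.count a := List.count_pos_iff.mpr hm
      have : ((a :: t).count a : Int) > 1 := by
        rw [List.count_cons_self]; push_cast; omega
      rw [if_pos this]
      simp [pvFirstDup, hm]
    · have hz : t.count a = 0 := List.count_eq_zero.mpr hm
      have hn : ¬ (((a :: t).count a : Int) > 1) := by
        rw [List.count_cons_self, hz]; norm_num
      rw [if_neg hn]
      have hcongr : pvScanB (pvCountsB (a :: t)) t = pvScanB (pvCountsB t) t := by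
        apply pvScanB_congr
        intro x hx
        have hxa : ¬ (a == x) = true := by
          intro hh
          exact hm (by rw [eq_of_beq hh]; exact hx)
        rw [pvCountsB_getD, pvCountsB_getD, List.count_cons, if_neg hxa]
        simp
      rw [hcongr, ih]
      simp [pvFirstDup, hm]

lemma pvOuterA_zero (L : List String) :
    pvOuterA L 0 (PySem.List.pyRange 0 ((L.length : Int) - 1) 1) = pvFirstDup L := by
  have h := pvOuterA_eq L L.length 0 (by omega)
  simpa using h

-- ===== VERDICT (by name: the statement is the Claim_ definition above) =====
theorem find_dup_str_spec : Claim_equal_find_dup_str := by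
  intro s n _
  unfold Spec_find_dup_str find_dup_str find_dup_str_alt
  simp only [PySem.List.foldl_append_singleton_eq_map, List.nil_append, pvScanB_counts,
    pvOuterA_zero]
  cases pvFirstDup ((PySem.List.pyRange 0 (PySem.Str.len s - 1) 1).map
      (fun x => PySem.Str.slice s (some x) (some (x + n)))) <;> rfl
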